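-- pv_equiv track=rewrite | github.com/kenshiro-17/Job-Finder-App | backend/app/services/job_scraper.py | _normalize_experience_level
-- ===== SOURCE A (Python) =====
-- def _normalize_experience_level(value: str) -> str:
--     token = value.lower().strip()
--     if any(part in token for part in ("intern", "internship", "praktikum", "graduate", "entry level", "entry-level", "trainee")):
--         return "entry"
--     if any(part in token for part in ("junior", "jr")):
--         return "junior"
--     if any(part in token for part in ("senior", "sr", "staff", "principal", "lead", "head of", "team lead")):
--         if any(part in token for part in ("lead", "principal", "head of", "staff")):
--             return "lead"
--         return "senior"
--     if any(part in token for part in ("mid", "intermediate", "experienced", "professional")):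
--         return "mid"
--     return ""
-- ===== SOURCE B (Python) =====
-- # Different algorithm: one left-to-right scan of the token accumulating a category bitmask
-- # (testing which keywords start at each position), then a priority decode of the mask.
-- _KEYWORD_BITS = [
--     ("intern", 0), ("internship", 0), ("praktikum", 0), ("graduate", 0),
--     ("entry level", 0), ("entry-level", 0), ("trainee", 0),
--     ("junior", 1), ("jr", 1),
--     ("lead", 2), ("principal", 2), ("head of", 2), ("staff", 2),
--     ("senior", 3), ("sr", 3), ("team lead", 3),
--     ("mid", 4), ("intermediate", 4), ("experienced", 4), ("professional", 4),
-- ]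
-- _LABELS = ("entry", "junior", "lead", "senior", "mid")
--
-- def _normalize_experience_level(value: str) -> str:
--     token = value.lower().strip()
--     mask = 0
--     for i in range(len(token)):
--         for word, bit in _KEYWORD_BITS:
--             if token.startswith(word, i):
--                 mask |= 1 << bit
--     for bit, label in enumerate(_LABELS):
--         if mask & (1 << bit):
--             return label
--     return ""
-- ===== Notes on version B (the rewrite author's own statement) =====
-- stated objective: alternative
-- what changed: Instead of A's ordered chain of substring membership tests with a nested senior/lead conditional, B makes one left-to-right scan of the token, at each position recording in a bitmask which keyword categories start there, and then decodes the mask by priority (entry, junior, lead, senior, mid); equivalent because a bit is set iff some keyword of that category occurs as a substring, and any occurrence of the two-word senior phrase also sets the lead bit, matching A's nested rule.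
import Mathlib
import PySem

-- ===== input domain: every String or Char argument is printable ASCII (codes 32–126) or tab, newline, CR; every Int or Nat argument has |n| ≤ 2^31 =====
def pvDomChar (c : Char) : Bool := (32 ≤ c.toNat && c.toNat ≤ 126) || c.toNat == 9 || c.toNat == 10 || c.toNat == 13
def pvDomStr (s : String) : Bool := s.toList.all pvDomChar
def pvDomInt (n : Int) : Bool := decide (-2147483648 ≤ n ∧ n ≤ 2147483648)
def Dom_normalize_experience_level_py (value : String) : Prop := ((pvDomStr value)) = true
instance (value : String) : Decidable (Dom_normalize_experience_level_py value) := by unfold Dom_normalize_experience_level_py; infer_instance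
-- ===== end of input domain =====

-- B replaces A's chain of substring tests by a single positional scan that accumulates a
-- category bitmask, decoded afterwards by priority (objective: alternative).

-- ===== PORT A =====
def normalize_experience_level_py (value : String) : String :=
  let token := PySem.Str.strip (PySem.Str.lower value)
  if (["intern", "internship", "praktikum", "graduate", "entry level", "entry-level", "trainee"].any
      (fun part => PySem.Str.isIn part token)) then "entry"
  else if (["junior", "jr"].any (fun part => PySem.Str.isIn part token)) then "junior"
  else if (["senior", "sr", "staff", "principal", "lead", "head of", "team lead"].any
      (fun part => PySem.Str.isIn part token)) then
    if (["lead", "principal", "head of", "staff"].any (fun part => PySem.Str.isIn part token)) then "lead"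
    else "senior"
  else if (["mid", "intermediate", "experienced", "professional"].any
      (fun part => PySem.Str.isIn part token)) then "mid"
  else ""

-- ===== PORT B =====
-- keyword → category bit (0 entry, 1 junior, 2 lead, 3 senior, 4 mid)
def pvKeywordBits : List (List Char × Nat) :=
  [ ("intern".toList, 0), ("internship".toList, 0), ("praktikum".toList, 0), ("graduate".toList, 0),
    ("entry level".toList, 0), ("entry-level".toList, 0), ("trainee".toList, 0),
    ("junior".toList, 1), ("jr".toList, 1),
    ("lead".toList, 2), ("principal".toList, 2), ("head of".toList, 2), ("staff".toList, 2),
    ("senior".toList, 3), ("sr".toList, 3), ("team lead".toList, 3),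
    ("mid".toList, 4), ("intermediate".toList, 4), ("experienced".toList, 4), ("professional".toList, 4) ]

def pvLabels : List String := ["entry", "junior", "lead", "senior", "mid"]

-- inner loop at one position: set the bit of every keyword starting here
def pvPosStep (u : List Char) (m : Nat) : Nat :=
  pvKeywordBits.foldl (fun mm p => if List.isPrefixOf p.1 u then mm ||| (1 <<< p.2) else mm) m

-- outer loop over positions (suffixes of the token)
def pvScan : Nat → List Char → Nat
  | m, [] => m
  | m, c :: rest => pvScan (pvPosStep (c :: rest) m) rest

-- priority decode: first set bit wins
def pvDecode (mask : Nat) : List (Nat × String) → String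
  | [] => ""
  | (bit, label) :: rest => if mask &&& (1 <<< bit) != 0 then label else pvDecode mask rest

def normalize_experience_level_py_alt (value : String) : String :=
  pvDecode (pvScan 0 (PySem.Chars.strip (PySem.Chars.lower value.toList)))
    ((List.range pvLabels.length).zip pvLabels)

-- ===== PRECONDITION & SPEC =====
def Spec_normalize_experience_level_py (value : String) (out : String) : Prop := out = normalize_experience_level_py_alt value
instance (value : String) (out : String) : Decidable (Spec_normalize_experience_level_py value out) := by unfold Spec_normalize_experience_level_py; infer_instance

-- ===== CLAIM (what is proved, stated in full; the proofs are below) =====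
def Claim_equal_normalize_experience_level_py : Prop := ∀ (value : String), Dom_normalize_experience_level_py value → Spec_normalize_experience_level_py value (normalize_experience_level_py value)

-- ===== LEMMAS AND PROOFS =====

-- a bit of the inner fold: set iff already set or a keyword with this bit starts here
theorem pvPosStep_testBit_aux (ks : List (List Char × Nat)) (u : List Char) (m : Nat) (b : Nat) :
    (ks.foldl (fun mm p => if List.isPrefixOf p.1 u then mm ||| (1 <<< p.2) else mm) m).testBit b
      = (m.testBit b || ks.any (fun p => p.2 == b && List.isPrefixOf p.1 u)) := by
  induction ks generalizing m with
  | nil => simp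
  | cons p rest ih =>
    simp only [List.foldl_cons, List.any_cons, ih]
    by_cases h : List.isPrefixOf p.1 u
    · simp only [h, if_pos, Nat.testBit_or, Nat.one_shiftLeft, Nat.testBit_two_pow,
        Bool.and_true]
      by_cases hb : p.2 = b <;>
        simp [hb, Bool.or_comm, Bool.or_left_comm]
    · simp [h]

-- an 'any' over a pointwise disjunction splits into a disjunction of 'any's
theorem any_or_split (qs : List (List Char × Nat)) (b : Nat) (f g : List Char → Bool) :
    qs.any (fun p => p.2 == b && (f p.1 || g p.1))
      = (qs.any (fun p => p.2 == b && f p.1) || qs.any (fun p => p.2 == b && g p.1)) := by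
  induction qs with
  | nil => simp
  | cons q qs ih =>
    simp only [List.any_cons, ih]
    cases (q.2 == b) <;> cases f q.1 <;> cases g q.1 <;>
      simp [Bool.or_comm]

-- the boolean substring test distributes over cons as prefix-here-or-in-tail
theorem isIn_cons (w : List Char) (c : Char) (u : List Char) :
    PySem.Chars.isIn w (c :: u) = (List.isPrefixOf w (c :: u) || PySem.Chars.isIn w u) := by
  rw [Bool.eq_iff_iff, PySem.Chars.isIn_iff_infix, Bool.or_eq_true, PySem.Chars.isIn_iff_infix,
    List.isPrefixOf_iff_prefix]
  exact List.infix_cons_iff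

-- a bit of the scan: set iff some keyword with this bit occurs as a substring
theorem pvScan_testBit (u : List Char) (m : Nat) (b : Nat) :
    (pvScan m u).testBit b
      = (m.testBit b || pvKeywordBits.any (fun p => p.2 == b && PySem.Chars.isIn p.1 u)) := by
  induction u generalizing m with
  | nil =>
    suffices h : pvKeywordBits.any (fun p => p.2 == b && PySem.Chars.isIn p.1 []) = false by
      simp [pvScan, h]
    rw [List.any_eq_false]
    intro p hp
    have h0 : pvKeywordBits.all (fun p => !PySem.Chars.isIn p.1 []) = true := by decide
    rw [List.all_eq_true] at h0
    have h1 : PySem.Chars.isIn p.1 [] = false := by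
      have := h0 p hp; simpa using this
    simp [h1]
  | cons c rest ih =>
    rw [pvScan, ih, pvPosStep, pvPosStep_testBit_aux, Bool.or_assoc]
    congr 1
    simp only [isIn_cons]
    exact (any_or_split pvKeywordBits b
      (fun w => List.isPrefixOf w (c :: rest)) (fun w => PySem.Chars.isIn w rest)).symm

-- Python's 'mask & (1 << b)' truthiness is exactly testBit
theorem and_shift_ne_zero (x b : Nat) : (x &&& (1 <<< b) != 0) = x.testBit b := by
  simp only [Nat.one_shiftLeft, Nat.and_two_pow]
  cases h : x.testBit b <;> simp [Nat.pow_eq_zero]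

-- any token containing "team lead" also contains "lead"
theorem isIn_lead_of_team_lead (u : List Char)
    (h : PySem.Chars.isIn ['t', 'e', 'a', 'm', ' ', 'l', 'e', 'a', 'd'] u = true) :
    PySem.Chars.isIn ['l', 'e', 'a', 'd'] u = true := by
  rw [PySem.Chars.isIn_iff_infix] at h ⊢
  exact List.IsInfix.trans (by decide) h

-- ===== VERDICT (by name: the statement is the Claim_ definition above) =====
theorem normalize_experience_level_py_spec : Claim_equal_normalize_experience_level_py := by
  intro value _
  unfold Spec_normalize_experience_level_py normalize_experience_level_py
    normalize_experience_level_py_alt pvLabels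
  simp only [List.any_cons, List.any_nil, Bool.or_false, Bool.or_eq_true,
    PySem.Str.isIn_eq, PySem.Str.toList_strip, PySem.Str.toList_lower,
    List.length_cons, List.length_nil, List.range_succ, List.range_zero,
    List.nil_append, List.cons_append, List.zip_cons_cons, List.zip_nil_right,
    pvDecode, and_shift_ne_zero]
  set u := PySem.Chars.strip (PySem.Chars.lower value.toList) with hu
  rw [pvScan_testBit u 0 0, pvScan_testBit u 0 1, pvScan_testBit u 0 2,
    pvScan_testBit u 0 3, pvScan_testBit u 0 4]
  simp only [Nat.zero_testBit, Bool.false_or, pvKeywordBits, List.any_cons, List.any_nil]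
  norm_num
  by_cases hTL : PySem.Chars.isIn ['t', 'e', 'a', 'm', ' ', 'l', 'e', 'a', 'd'] u = true
  · have hL := isIn_lead_of_team_lead u hTL
    simp [hTL, hL]
  · rw [Bool.not_eq_true] at hTL
    by_cases h1 : PySem.Chars.isIn ['l', 'e', 'a', 'd'] u = true <;>
      by_cases h2 : PySem.Chars.isIn ['p', 'r', 'i', 'n', 'c', 'i', 'p', 'a', 'l'] u = true <;>
        by_cases h3 : PySem.Chars.isIn ['h', 'e', 'a', 'd', ' ', 'o', 'f'] u = true <;>
          by_cases h4 : PySem.Chars.isIn ['s', 't', 'a', 'f', 'f'] u = true <;>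
            simp_all
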